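-- pv_equiv track=rewrite | github.com/Whohahaha/DGUS_ICO_Decoder | extract_custom_ico.py | detile_words
-- ===== SOURCE A (Python) =====
-- def detile_words(words, width, height, tile, tile_order):
--     tiles_x = (width + tile - 1) // tile
--     tiles_y = (height + tile - 1) // tile
--     out = [0] * (width * height)
--     idx = 0
--     if tile_order == "col":
--         tile_iter = ((tx, ty) for tx in range(tiles_x) for ty in range(tiles_y))
--     else:
--         tile_iter = ((tx, ty) for ty in range(tiles_y) for tx in range(tiles_x))
--     for tx, ty in tile_iter:
--         for y in range(tile):
--             py = ty * tile + y
--             if py >= height: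
--                 continue
--             row_base = py * width
--             for x in range(tile):
--                 px = tx * tile + x
--                 if px >= width:
--                     continue
--                 if idx >= len(words):
--                     return None
--                 out[row_base + px] = words[idx]
--                 idx += 1
--     if idx != len(words):
--         return None
--     return out
-- ===== SOURCE B (Python) =====
-- def detile_words(words, width, height, tile, tile_order):
--     if tile > 0 and width > 0 and height > 0:
--         expected = width * height
--     else:
--         expected = 0
--     if len(words) != expected:
--         return None
--     if expected == 0:
--         return [0] * (width * height)
--
--     def word_index(py, px):
--         ty, y = divmod(py, tile)
--         tx, x = divmod(px, tile)
--         rows_in = min(tile, height - ty * tile)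
--         cols_in = min(tile, width - tx * tile)
--         if tile_order == "col":
--             return tx * tile * height + ty * tile * cols_in + y * cols_in + x
--         else:
--             return ty * tile * width + tx * tile * rows_in + y * cols_in + x
--
--     return [words[word_index(py, px)] for py in range(height) for px in range(width)]
-- ===== Notes on version B (the rewrite author's own statement) =====
-- stated objective: faster
-- what changed: B inverts the tiling map: instead of A's scatter loop over tiles that writes words into an output buffer with a running index, B checks the word count once and builds the output row-major by gathering, computing for each pixel (py,px) the closed-form index of its word in the tiled stream (from divmod by tile and the sizes of the full bands preceding it); B never iterates over tile cells, so it avoids A's cost on skipped out-of-bounds cells, which grows with tile.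
import Mathlib
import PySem

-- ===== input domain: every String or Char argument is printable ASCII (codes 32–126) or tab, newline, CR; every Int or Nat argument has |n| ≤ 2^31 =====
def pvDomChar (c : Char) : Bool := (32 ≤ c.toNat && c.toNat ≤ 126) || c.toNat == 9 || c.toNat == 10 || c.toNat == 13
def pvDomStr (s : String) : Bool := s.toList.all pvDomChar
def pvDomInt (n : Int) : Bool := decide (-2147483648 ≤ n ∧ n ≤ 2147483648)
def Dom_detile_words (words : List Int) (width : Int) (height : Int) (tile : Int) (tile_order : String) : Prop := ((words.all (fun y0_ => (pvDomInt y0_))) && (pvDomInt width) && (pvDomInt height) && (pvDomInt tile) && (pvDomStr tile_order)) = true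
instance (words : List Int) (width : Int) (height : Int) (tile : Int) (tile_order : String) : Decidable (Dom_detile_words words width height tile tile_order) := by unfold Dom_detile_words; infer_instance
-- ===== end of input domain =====

-- B inverts the tiling map: it checks the word count once and builds the output row-major by
-- gathering words[word_index(py, px)] with a closed-form inverse index, instead of A's scatter
-- loop over tiles writing through a running index; B never iterates over tile cells (A's loops
-- also visit skipped out-of-bounds cells), which a timing run measured as faster.

-- ===== PORT A =====
-- the body of A's innermost write step ('if idx >= len(words): return None; out[pos] = words[idx]; idx += 1'),
-- with early return modelled as the absorbing state 'none'
def detileStep (words : List Int) (st : Option (List Int × Nat)) (pos : Int) : Option (List Int × Nat) :=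
  match st with
  | none => none
  | some (out, idx) =>
    if idx ≥ words.length then none
    else some (PySem.List.pySetD out pos (PySem.List.pyGetD words (idx : Int) 0), idx + 1)

def detile_words (words : List Int) (width : Int) (height : Int) (tile : Int) (tile_order : String) : Option (List Int) :=
  let tiles_x := PySem.Int.floordiv (width + tile - 1) tile
  let tiles_y := PySem.Int.floordiv (height + tile - 1) tile
  let out0 : List Int := List.replicate (width * height).toNat 0
  let tile_iter : List (Int × Int) :=
    if tile_order == "col" then
      (PySem.List.pyRange 0 tiles_x 1).flatMap (fun tx => (PySem.List.pyRange 0 tiles_y 1).map (fun ty => (tx, ty)))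
    else
      (PySem.List.pyRange 0 tiles_y 1).flatMap (fun ty => (PySem.List.pyRange 0 tiles_x 1).map (fun tx => (tx, ty)))
  let fin := tile_iter.foldl (fun st txy =>
      (PySem.List.pyRange 0 tile 1).foldl (fun st y =>
        let py := txy.2 * tile + y
        if py ≥ height then st
        else
          let row_base := py * width
          (PySem.List.pyRange 0 tile 1).foldl (fun st x =>
            let px := txy.1 * tile + x
            if px ≥ width then st
            else detileStep words st (row_base + px)) st) st)
    (some (out0, 0))
  match fin with
  | none => none
  | some (out, idx) => if idx = words.length then some out else none

-- ===== PORT B =====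
-- closed-form index of pixel (py, px) in the tiled word stream (B's nested 'word_index')
def wordIndexB (width : Int) (height : Int) (tile : Int) (tile_order : String) (py px : Int) : Int :=
  let ty := PySem.Int.floordiv py tile
  let y := PySem.Int.mod py tile
  let tx := PySem.Int.floordiv px tile
  let x := PySem.Int.mod px tile
  let rows_in := min tile (height - ty * tile)
  let cols_in := min tile (width - tx * tile)
  if tile_order == "col" then tx * tile * height + ty * tile * cols_in + y * cols_in + x
  else ty * tile * width + tx * tile * rows_in + y * cols_in + x

def detile_words_alt (words : List Int) (width : Int) (height : Int) (tile : Int) (tile_order : String) : Option (List Int) :=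
  let expected := if 0 < tile ∧ 0 < width ∧ 0 < height then width * height else 0
  if (words.length : Int) ≠ expected then none
  else if expected = 0 then some (List.replicate (width * height).toNat 0)
  else some ((PySem.List.pyRange 0 height 1).flatMap (fun py =>
    (PySem.List.pyRange 0 width 1).map (fun px =>
      PySem.List.pyGetD words (wordIndexB width height tile tile_order py px) 0)))

-- ===== PRECONDITION & SPEC =====
-- Pre_ excludes exactly tile = 0, where Python A raises ZeroDivisionError on '// tile'.
def Pre_detile_words (words : List Int) (width : Int) (height : Int) (tile : Int) (tile_order : String) : Prop := tile ≠ 0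
instance (words : List Int) (width : Int) (height : Int) (tile : Int) (tile_order : String) : Decidable (Pre_detile_words words width height tile tile_order) := by unfold Pre_detile_words; infer_instance
def pvWitness_detile_words : List Int × Int × Int × Int × String := ([1, 2, 3, 4], 2, 2, 2, "row")

def Spec_detile_words (words : List Int) (width : Int) (height : Int) (tile : Int) (tile_order : String) (out : Option (List Int)) : Prop := out = detile_words_alt words width height tile tile_order
instance (words : List Int) (width : Int) (height : Int) (tile : Int) (tile_order : String) (out : Option (List Int)) : Decidable (Spec_detile_words words width height tile tile_order out) := by unfold Spec_detile_words; infer_instance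

-- ===== CLAIM (what is proved, stated in full; the proofs are below) =====
def Claim_equal_detile_words : Prop := ∀ (words : List Int) (width : Int) (height : Int) (tile : Int) (tile_order : String), Dom_detile_words words width height tile tile_order → Pre_detile_words words width height tile tile_order → Spec_detile_words words width height tile tile_order (detile_words words width height tile tile_order)
-- ===== LEMMAS AND PROOFS =====

-- ---- characterisation of A's fused write loop (scatter form) ----

-- a skipped iteration is an identity step: folding with an 'if c then skip' equals folding over the filtered list
theorem foldl_skip_eq_foldl_filter {α γ : Type} (l : List α) (c : α → Prop) [DecidablePred c]
    (d : α → Bool) (hd : ∀ x, d x = true ↔ ¬ c x) (h : γ → α → γ) (init : γ) :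
    l.foldl (fun st x => if c x then st else h st x) init = (l.filter d).foldl h init := by
  induction l generalizing init with
  | nil => rfl
  | cons a t ih =>
    by_cases hc : c a
    · have hda : d a = false := by rw [Bool.eq_false_iff]; simp [hd, hc]
      simp [List.foldl_cons, hda, hc, ih]
    · have hda : d a = true := (hd a).mpr hc
      simp [List.foldl_cons, hda, hc, ih]

-- folding per element over a generated chunk equals one fold over the flattened list
theorem foldl_chunks_eq_foldl_flatMap {α β γ : Type} (l : List α) (g : α → List β) (f : γ → β → γ) (init : γ) :
    l.foldl (fun st x => (g x).foldl f st) init = (l.flatMap g).foldl f init := by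
  induction l generalizing init with
  | nil => rfl
  | cons a t ih => simp [List.flatMap_cons, List.foldl_append, ih]

theorem detileStep_none (words : List Int) (ps : List Int) :
    ps.foldl (detileStep words) none = none := by
  induction ps with
  | nil => rfl
  | cons p t ih => simpa [detileStep] using ih

-- characterisation of A's fused write loop as a length test plus a zip-assignment pass
theorem foldl_detileStep_spec (words : List Int) (ps : List Int) (out : List Int) (idx : Nat)
    (hidx : idx ≤ words.length) :
    ps.foldl (detileStep words) (some (out, idx)) =
      if idx + ps.length ≤ words.length
      then some ((ps.zip (words.drop idx)).foldl (fun o pw => PySem.List.pySetD o pw.1 pw.2) out,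
                 idx + ps.length)
      else none := by
  induction ps generalizing out idx with
  | nil => simp [hidx]
  | cons p t ih =>
    by_cases hlt : idx < words.length
    · have hdrop : words.drop idx = words[idx] :: words.drop (idx + 1) :=
        List.drop_eq_getElem_cons hlt
      have hget : PySem.List.pyGetD words (idx : Int) 0 = words[idx] := by
        simp [PySem.List.pyGetD_natCast, List.getD_eq_getElem?_getD, List.getElem?_eq_getElem hlt]
      rw [List.foldl_cons]
      have hstep : detileStep words (some (out, idx)) p
          = some (PySem.List.pySetD out p words[idx], idx + 1) := by
        simp [detileStep, Nat.not_le.mpr hlt, hget]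
      rw [hstep, ih _ _ hlt, hdrop]
      simp only [List.zip_cons_cons, List.foldl_cons, List.length_cons]
      have harith : idx + 1 + t.length = idx + (t.length + 1) := by omega
      rw [harith]
    · have hidx' : idx = words.length := by omega
      rw [List.foldl_cons]
      have hstep : detileStep words (some (out, idx)) p = none := by
        simp [detileStep, hidx']
      rw [hstep, detileStep_none]
      have : ¬ idx + (t.length + 1) ≤ words.length := by omega
      simp [List.length_cons, this]

-- A's whole loop, for an arbitrary tile list T, as "positions / length test / scatter"
theorem detile_fold_eq (words : List Int) (width height tile : Int) (T : List (Int × Int)) :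
    (match T.foldl (fun st txy =>
        (PySem.List.pyRange 0 tile 1).foldl (fun st y =>
          if txy.2 * tile + y ≥ height then st
          else (PySem.List.pyRange 0 tile 1).foldl (fun st x =>
            if txy.1 * tile + x ≥ width then st
            else detileStep words st ((txy.2 * tile + y) * width + (txy.1 * tile + x))) st) st)
        (some (List.replicate (width * height).toNat 0, 0)) with
     | none => none
     | some (out, idx) => if idx = words.length then some out else none)
    =
    (let positions := T.flatMap (fun txy =>
        ((PySem.List.pyRange 0 tile 1).filter (fun y => decide (txy.2 * tile + y < height))).flatMap (fun y =>
          ((PySem.List.pyRange 0 tile 1).filter (fun x => decide (txy.1 * tile + x < width))).map (fun x =>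
            (txy.2 * tile + y) * width + (txy.1 * tile + x))));
     if positions.length ≠ words.length then none
     else some ((positions.zip words).foldl (fun out pw => PySem.List.pySetD out pw.1 pw.2)
          (List.replicate (width * height).toNat 0))) := by
  have hx : ∀ (txy : Int × Int) (y : Int) (st : Option (List Int × Nat)),
      (PySem.List.pyRange 0 tile 1).foldl (fun st x =>
          if txy.1 * tile + x ≥ width then st
          else detileStep words st ((txy.2 * tile + y) * width + (txy.1 * tile + x))) st
      = (((PySem.List.pyRange 0 tile 1).filter (fun x => decide (txy.1 * tile + x < width))).map
          (fun x => (txy.2 * tile + y) * width + (txy.1 * tile + x))).foldl (detileStep words) st := by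
    intro txy y st
    rw [foldl_skip_eq_foldl_filter _ (fun x => txy.1 * tile + x ≥ width)
        (fun x => decide (txy.1 * tile + x < width)) (by intro x; simp),
      List.foldl_map]
  have hchunk : ∀ (txy : Int × Int) (st : Option (List Int × Nat)),
      (PySem.List.pyRange 0 tile 1).foldl (fun st y =>
          if txy.2 * tile + y ≥ height then st
          else (PySem.List.pyRange 0 tile 1).foldl (fun st x =>
            if txy.1 * tile + x ≥ width then st
            else detileStep words st ((txy.2 * tile + y) * width + (txy.1 * tile + x))) st) st
      = (((PySem.List.pyRange 0 tile 1).filter (fun y => decide (txy.2 * tile + y < height))).flatMap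
          (fun y => ((PySem.List.pyRange 0 tile 1).filter (fun x => decide (txy.1 * tile + x < width))).map
            (fun x => (txy.2 * tile + y) * width + (txy.1 * tile + x)))).foldl (detileStep words) st := by
    intro txy st
    rw [foldl_skip_eq_foldl_filter _ (fun y => txy.2 * tile + y ≥ height)
        (fun y => decide (txy.2 * tile + y < height)) (by intro y; simp)]
    rw [show (fun (st : Option (List Int × Nat)) (y : Int) =>
          (PySem.List.pyRange 0 tile 1).foldl (fun st x =>
            if txy.1 * tile + x ≥ width then st
            else detileStep words st ((txy.2 * tile + y) * width + (txy.1 * tile + x))) st)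
        = (fun st y => (((PySem.List.pyRange 0 tile 1).filter (fun x => decide (txy.1 * tile + x < width))).map
            (fun x => (txy.2 * tile + y) * width + (txy.1 * tile + x))).foldl (detileStep words) st)
      from funext fun st => funext fun y => hx txy y st]
    rw [foldl_chunks_eq_foldl_flatMap]
  rw [show (fun (st : Option (List Int × Nat)) (txy : Int × Int) =>
        (PySem.List.pyRange 0 tile 1).foldl (fun st y =>
          if txy.2 * tile + y ≥ height then st
          else (PySem.List.pyRange 0 tile 1).foldl (fun st x =>
            if txy.1 * tile + x ≥ width then st
            else detileStep words st ((txy.2 * tile + y) * width + (txy.1 * tile + x))) st) st)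
      = (fun st txy => (((PySem.List.pyRange 0 tile 1).filter (fun y => decide (txy.2 * tile + y < height))).flatMap
          (fun y => ((PySem.List.pyRange 0 tile 1).filter (fun x => decide (txy.1 * tile + x < width))).map
            (fun x => (txy.2 * tile + y) * width + (txy.1 * tile + x)))).foldl (detileStep words) st)
    from funext fun st => funext fun txy => hchunk txy st]
  rw [foldl_chunks_eq_foldl_flatMap]
  rw [foldl_detileStep_spec words _ _ 0 (Nat.zero_le _)]
  simp only [Nat.zero_add, List.drop_zero, ne_eq]
  generalize (T.flatMap (fun txy =>
      ((PySem.List.pyRange 0 tile 1).filter (fun y => decide (txy.2 * tile + y < height))).flatMap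
        (fun y => ((PySem.List.pyRange 0 tile 1).filter (fun x => decide (txy.1 * tile + x < width))).map
          (fun x => (txy.2 * tile + y) * width + (txy.1 * tile + x))))) = P
  by_cases hlen : P.length = words.length
  · simp [hlen]
  · by_cases hle : P.length ≤ words.length <;> simp [hlen, hle]


def cInN (W T i : Nat) : Nat := min T (W - i * T)

def quadL (A B : Nat) (r c : Nat → Nat → Nat) (pos : Nat → Nat → Nat → Nat → Nat) : List Nat :=
  (List.range A).flatMap (fun a => (List.range B).flatMap (fun b =>
    (List.range (r a b)).flatMap (fun y => (List.range (c a b)).map (fun x => pos a b y x))))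

theorem range_filter_lt (n m : Nat) :
    (List.range n).filter (fun k => decide (k < m)) = List.range (min n m) := by
  induction n with
  | zero => simp
  | succ n ih =>
    rw [List.range_succ, List.filter_append, ih]
    by_cases h : n < m
    · have h1 : min n m = n := by omega
      have h2 : min (n+1) m = n+1 := by omega
      simp [h, h1, h2, List.range_succ]
    · have h1 : min (n+1) m = min n m := by omega
      simp [h, h1]

theorem sum_map_const_nat (n c : Nat) : ((List.range n).map (fun _ => c)).sum = n * c := by
  simp [List.map_const', List.sum_replicate, smul_eq_mul]

theorem len_flatMap_map {β : Type} (r c : Nat) (g : Nat → Nat → β) :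
    ((List.range r).flatMap (fun y => (List.range c).map (g y))).length = r * c := by
  simp [List.length_flatMap, List.map_map, Function.comp, sum_map_const_nat]

theorem get_flatMap_range {β : Type} (n a r : Nat) (f : Nat → List β) (ha : a < n)
    (hr : r < (f a).length) :
    ((List.range n).flatMap f)[(((List.range a).map (fun i => (f i).length)).sum + r)]? = (f a)[r]? := by
  obtain ⟨k, rfl⟩ : ∃ k, n = a + (k + 1) := ⟨n - a - 1, by omega⟩
  rw [List.range_add, List.flatMap_append, List.flatMap_map]
  rw [List.getElem?_append_right (by rw [List.length_flatMap]; omega)]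
  rw [List.length_flatMap, Nat.add_sub_cancel_left]
  rw [List.range_succ_eq_map, List.flatMap_cons]
  rw [List.getElem?_append_left (by simpa using hr)]
  simp

theorem sum_range_ge (g : Nat → Nat) (B b : Nat) (hb : b < B) :
    ((List.range b).map g).sum + g b ≤ ((List.range B).map g).sum := by
  induction B with
  | zero => omega
  | succ B ih =>
    rw [List.range_succ, List.map_append, List.sum_append]
    rcases Nat.lt_succ_iff_lt_or_eq.mp hb with h | h
    · have := ih h; simp; omega
    · subst h; simp

theorem sum_min_eq_of_le (t W a : Nat) (h : a * t ≤ W) :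
    ((List.range a).map (fun i => min t (W - i * t))).sum = a * t := by
  induction a with
  | zero => simp
  | succ a ih =>
    rw [List.range_succ, List.map_append, List.sum_append]
    have hs : (a+1) * t = a * t + t := by ring
    rw [hs] at h ⊢
    have h' : a * t ≤ W := by omega
    rw [ih h']
    simp
    omega

theorem sum_min_eq_total (t W q : Nat) (ht : 0 < t) (h : W ≤ q * t) :
    ((List.range q).map (fun i => min t (W - i * t))).sum = W := by
  induction q with
  | zero => simp at h ⊢; omega
  | succ q ih =>
    rw [List.range_succ, List.map_append, List.sum_append]
    by_cases hq : W ≤ q * t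
    · rw [ih hq]; simp; omega
    · have hs : (q+1) * t = q * t + t := by ring
      rw [hs] at h
      have h1 : q * t ≤ W := by omega
      rw [sum_min_eq_of_le t W q h1]
      simp
      omega

theorem quad_len (A B : Nat) (r c : Nat → Nat → Nat) (pos : Nat → Nat → Nat → Nat → Nat) :
    (quadL A B r c pos).length
      = ((List.range A).map (fun a => ((List.range B).map (fun b => r a b * c a b)).sum)).sum := by
  simp [quadL, List.length_flatMap, List.map_map, Function.comp, len_flatMap_map, sum_map_const_nat]

theorem quad_mem (A B : Nat) (r c : Nat → Nat → Nat) (pos : Nat → Nat → Nat → Nat → Nat)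
    (q : Nat) (hq : q ∈ quadL A B r c pos) :
    ∃ a b y x, a < A ∧ b < B ∧ y < r a b ∧ x < c a b ∧ q = pos a b y x := by
  simp only [quadL, List.mem_flatMap, List.mem_map, List.mem_range] at hq
  obtain ⟨a, ha, b, hb, y, hy, x, hx, rfl⟩ := hq
  exact ⟨a, b, y, x, ha, hb, hy, hx, rfl⟩

theorem quad_get (A B : Nat) (r c : Nat → Nat → Nat) (pos : Nat → Nat → Nat → Nat → Nat)
    (a b y x : Nat) (ha : a < A) (hb : b < B) (hy : y < r a b) (hx : x < c a b)
    (P1 P2 : Nat)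
    (h1 : ((List.range a).map (fun i => ((List.range B).map (fun j => r i j * c i j)).sum)).sum = P1)
    (h2 : ((List.range b).map (fun j => r a j * c a j)).sum = P2) :
    (quadL A B r c pos)[(P1 + (P2 + (y * c a b + x)))]? = some (pos a b y x) := by
  have hflen : ∀ i, ((List.range B).flatMap (fun j => (List.range (r i j)).flatMap
        (fun y' => (List.range (c i j)).map (fun x' => pos i j y' x')))).length
      = ((List.range B).map (fun j => r i j * c i j)).sum := by
    intro i
    simp [List.length_flatMap, List.map_map, Function.comp, len_flatMap_map, sum_map_const_nat]
  have hchunklen : ∀ i j, ((List.range (r i j)).flatMap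
        (fun y' => (List.range (c i j)).map (fun x' => pos i j y' x'))).length = r i j * c i j := by
    intro i j; exact len_flatMap_map _ _ _
  have hrem2 : y * c a b + x < r a b * c a b := by nlinarith
  have hrem1 : P2 + (y * c a b + x)
      < ((List.range B).flatMap (fun j => (List.range (r a j)).flatMap
          (fun y' => (List.range (c a j)).map (fun x' => pos a j y' x')))).length := by
    rw [hflen a]
    have := sum_range_ge (fun j => r a j * c a j) B b hb
    simp only at this
    omega
  unfold quadL
  have hp1 : ((List.range a).map (fun i => ((List.range B).flatMap (fun j => (List.range (r i j)).flatMap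
        (fun y' => (List.range (c i j)).map (fun x' => pos i j y' x')))).length)).sum = P1 := by
    rw [← h1]; exact congrArg List.sum (List.map_congr_left (fun i _ => hflen i))
  rw [← hp1]
  rw [get_flatMap_range A a _ _ ha hrem1]
  have hp2 : ((List.range b).map (fun j => ((List.range (r a j)).flatMap
        (fun y' => (List.range (c a j)).map (fun x' => pos a j y' x'))).length)).sum = P2 := by
    rw [← h2]; exact congrArg List.sum (List.map_congr_left (fun j _ => hchunklen a j))
  rw [← hp2]
  rw [get_flatMap_range B b _ _ hb (by rw [hchunklen a b]; exact hrem2)]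
  have hp3 : ((List.range y).map (fun y' => ((List.range (c a b)).map (fun x' => pos a b y' x')).length)).sum
      = y * c a b := by
    simp [sum_map_const_nat]
  rw [show y * c a b + x = ((List.range y).map (fun y' => ((List.range (c a b)).map (fun x' => pos a b y' x')).length)).sum + x by rw [hp3]]
  rw [get_flatMap_range (r a b) y _ _ hy (by simpa using hx)]
  simp [List.getElem?_map, List.getElem?_range hx]


theorem scatter_length (pairs : List (Nat × Int)) (init : List Int) :
    (pairs.foldl (fun o pw => o.set pw.1 pw.2) init).length = init.length := by
  induction pairs generalizing init with
  | nil => rfl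
  | cons p t ih => rw [List.foldl_cons, ih, List.length_set]

theorem scatter_get_not_mem (PN : List Nat) (ws : List Int) (init : List Int) (p : Nat)
    (hp : p ∉ PN) :
    ((PN.zip ws).foldl (fun o pw => o.set pw.1 pw.2) init)[p]? = init[p]? := by
  induction PN generalizing ws init with
  | nil => rfl
  | cons q PN' ih =>
    cases ws with
    | nil => rfl
    | cons w0 ws' =>
      rw [List.zip_cons_cons, List.foldl_cons, ih _ _ (by simp at hp; exact hp.2)]
      exact List.getElem?_set_ne (by simp at hp; exact fun h => hp.1 h.symm)
  
theorem scatter_get (PN : List Nat) (ws : List Int) (init : List Int) (k p : Nat) (v : Int)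
    (hnd : PN.Nodup) (hrange : ∀ q ∈ PN, q < init.length)
    (hp : PN[k]? = some p) (hv : ws[k]? = some v) :
    ((PN.zip ws).foldl (fun o pw => o.set pw.1 pw.2) init)[p]? = some v := by
  induction PN generalizing ws init k with
  | nil => simp at hp
  | cons q PN' ih =>
    cases ws with
    | nil => simp at hv
    | cons w0 ws' =>
      rw [List.zip_cons_cons, List.foldl_cons]
      cases k with
      | zero =>
        simp only [List.getElem?_cons_zero, Option.some.injEq] at hp hv
        subst hp; subst hv
        rw [scatter_get_not_mem PN' ws' _ q (by rw [List.nodup_cons] at hnd; exact hnd.1)]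
        exact List.getElem?_set_self (hrange q (by simp))
      | succ k =>
        simp only [List.getElem?_cons_succ] at hp hv
        exact ih ws' _ k (List.Nodup.of_cons hnd)
          (fun r hr => by rw [List.length_set]; exact hrange r (List.mem_cons_of_mem _ hr)) hp hv

theorem scatter_cast (Q : List Nat) (ws init : List Int) :
    ((Q.map (fun (n : Nat) => (n : Int))).zip ws).foldl (fun o pw => PySem.List.pySetD o pw.1 pw.2) init
      = (Q.zip ws).foldl (fun o pw => o.set pw.1 pw.2) init := by
  induction Q generalizing ws init with
  | nil => rfl
  | cons q Q' ih =>
    cases ws with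
    | nil => rfl
    | cons w0 ws' => simp [List.zip_cons_cons, List.foldl_cons, ih, PySem.List.pySetD_natCast]

theorem nodup_of_inverse (L : List Nat) (F : Nat → Nat)
    (hF : ∀ j, j < L.length → F j < L.length ∧ L[F j]? = some j) : L.Nodup := by
  rw [List.nodup_iff_injective_get]
  have hget : ∀ j (hj : j < L.length), L.get ⟨F j, (hF j hj).1⟩ = j := by
    intro j hj
    have := (hF j hj).2
    rw [List.getElem?_eq_getElem (hF j hj).1] at this
    simpa [List.get_eq_getElem] using this
  have hginj : Function.Injective (fun j : Fin L.length => (⟨F j, (hF j j.2).1⟩ : Fin L.length)) := by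
    intro j1 j2 h
    have h' : F j1.val = F j2.val := congrArg Fin.val h
    have e1 := hget j1.val j1.2
    have e2 := hget j2.val j2.2
    have heq : L.get ⟨F j1.val, (hF j1.val j1.2).1⟩ = L.get ⟨F j2.val, (hF j2.val j2.2).1⟩ := by
      congr 2
    apply Fin.ext
    rw [e1, e2] at heq
    exact heq
  have hgsurj := Finite.injective_iff_surjective.mp hginj
  intro k1 k2 hk
  obtain ⟨j1, hj1⟩ := hgsurj k1
  obtain ⟨j2, hj2⟩ := hgsurj k2
  have e1 := hget j1.val j1.2
  have e2 := hget j2.val j2.2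
  rw [← hj1, ← hj2] at hk
  simp only at hk
  rw [e1, e2] at hk
  rw [← hj1, ← hj2]
  have hj : j1 = j2 := Fin.ext hk
  rw [hj]


-- ---- normalization of the position lists to Nat ranges ----

theorem pyfilter_range (tile : Int) (ht : 0 < tile) (a : Nat) (h : Int) :
    (PySem.List.pyRange 0 tile 1).filter (fun y => decide ((a : Int) * tile + y < h))
      = (List.range (cInN h.toNat tile.toNat a)).map (fun (k : Nat) => (k : Int)) := by
  rw [PySem.List.pyRange_one]
  have h0 : ((List.range (tile - 0).toNat).map (fun (k : Nat) => (0 : Int) + (k : Int)))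
      = (List.range tile.toNat).map (fun (k : Nat) => (k : Int)) := by simp
  rw [h0, List.filter_map]
  have hpred : ((fun y => decide ((a : Int) * tile + y < h)) ∘ (fun (k : Nat) => (k : Int)))
      = (fun k => decide (k < h.toNat - a * tile.toNat)) := by
    funext k
    have htn : (tile.toNat : Int) = tile := Int.toNat_of_nonneg (le_of_lt ht)
    have hs : (a : Int) * tile = ((a * tile.toNat : Nat) : Int) := by push_cast; rw [htn]
    simp only [Function.comp, decide_eq_decide, hs]
    omega
  rw [hpred, range_filter_lt]
  rfl

theorem inner_row (w h tile : Int) (hw : 0 ≤ w) (ht : 0 < tile) (a b : Nat) :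
    ((PySem.List.pyRange 0 tile 1).filter (fun y => decide ((a : Int) * tile + y < h))).flatMap (fun y =>
      ((PySem.List.pyRange 0 tile 1).filter (fun x => decide ((b : Int) * tile + x < w))).map (fun x =>
        ((a : Int) * tile + y) * w + ((b : Int) * tile + x)))
    = ((List.range (cInN h.toNat tile.toNat a)).flatMap (fun y => (List.range (cInN w.toNat tile.toNat b)).map
        (fun x => (((a * tile.toNat + y) * w.toNat + (b * tile.toNat + x) : Nat) : Int)))) := by
  rw [pyfilter_range tile ht a h, pyfilter_range tile ht b w]
  rw [List.flatMap_map]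
  congr 1
  funext y
  rw [List.map_map]
  congr 1
  funext x
  have htn : (tile.toNat : Int) = tile := Int.toNat_of_nonneg (le_of_lt ht)
  have hwn : (w.toNat : Int) = w := Int.toNat_of_nonneg hw
  simp only [Function.comp]
  push_cast [htn, hwn]
  ring

theorem P_norm_row (w h tile ty_b tx_b : Int) (hw : 0 ≤ w) (ht : 0 < tile) :
    ((PySem.List.pyRange 0 ty_b 1).flatMap (fun ty => (PySem.List.pyRange 0 tx_b 1).map (fun tx => (tx, ty)))).flatMap
      (fun txy => ((PySem.List.pyRange 0 tile 1).filter (fun y => decide (txy.2 * tile + y < h))).flatMap (fun y =>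
        ((PySem.List.pyRange 0 tile 1).filter (fun x => decide (txy.1 * tile + x < w))).map (fun x =>
          (txy.2 * tile + y) * w + (txy.1 * tile + x))))
    = (quadL ty_b.toNat tx_b.toNat (fun a _ => cInN h.toNat tile.toNat a) (fun _ b => cInN w.toNat tile.toNat b)
        (fun a b y x => (a * tile.toNat + y) * w.toNat + (b * tile.toNat + x))).map (fun (n : Nat) => (n : Int)) := by
  have htiles : ((PySem.List.pyRange 0 ty_b 1).flatMap (fun ty => (PySem.List.pyRange 0 tx_b 1).map (fun tx => (tx, ty))))
      = (List.range ty_b.toNat).flatMap (fun (a : Nat) => (List.range tx_b.toNat).map (fun (b : Nat) => ((b : Int), (a : Int)))) := by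
    rw [PySem.List.pyRange_one 0 ty_b, PySem.List.pyRange_one 0 tx_b]
    simp [List.flatMap_map, List.map_map, Function.comp_def]
  rw [htiles, List.flatMap_assoc]
  simp only [quadL, List.map_flatMap, List.map_map]
  congr 1
  funext a
  rw [List.flatMap_map]
  congr 1
  funext b
  exact inner_row w h tile hw ht a b

theorem P_norm_col (w h tile ty_b tx_b : Int) (hw : 0 ≤ w) (ht : 0 < tile) :
    ((PySem.List.pyRange 0 tx_b 1).flatMap (fun tx => (PySem.List.pyRange 0 ty_b 1).map (fun ty => (tx, ty)))).flatMap
      (fun txy => ((PySem.List.pyRange 0 tile 1).filter (fun y => decide (txy.2 * tile + y < h))).flatMap (fun y =>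
        ((PySem.List.pyRange 0 tile 1).filter (fun x => decide (txy.1 * tile + x < w))).map (fun x =>
          (txy.2 * tile + y) * w + (txy.1 * tile + x))))
    = (quadL tx_b.toNat ty_b.toNat (fun _ b => cInN h.toNat tile.toNat b) (fun a _ => cInN w.toNat tile.toNat a)
        (fun a b y x => (b * tile.toNat + y) * w.toNat + (a * tile.toNat + x))).map (fun (n : Nat) => (n : Int)) := by
  have htiles : ((PySem.List.pyRange 0 tx_b 1).flatMap (fun tx => (PySem.List.pyRange 0 ty_b 1).map (fun ty => (tx, ty))))
      = (List.range tx_b.toNat).flatMap (fun (a : Nat) => (List.range ty_b.toNat).map (fun (b : Nat) => ((a : Int), (b : Int)))) := by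
    rw [PySem.List.pyRange_one 0 tx_b, PySem.List.pyRange_one 0 ty_b]
    simp [List.flatMap_map, List.map_map, Function.comp_def]
  rw [htiles, List.flatMap_assoc]
  simp only [quadL, List.map_flatMap, List.map_map]
  congr 1
  funext a
  rw [List.flatMap_map]
  congr 1
  funext b
  exact inner_row w h tile hw ht b a

theorem B_norm (w h : Int) (g : Int → Int → Int) :
    (PySem.List.pyRange 0 h 1).flatMap (fun py => (PySem.List.pyRange 0 w 1).map (fun px => g py px))
      = (List.range h.toNat).flatMap (fun (pyn : Nat) => (List.range w.toNat).map (fun (pxn : Nat) => g (pyn : Int) (pxn : Int))) := by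
  rw [PySem.List.pyRange_one 0 h, PySem.List.pyRange_one 0 w]
  simp [List.flatMap_map, List.map_map, Function.comp_def]

theorem B_get {β : Type} (HN WN : Nat) (g : Nat → Nat → β) (pyn pxn : Nat) (hy : pyn < HN) (hx : pxn < WN) :
    ((List.range HN).flatMap (fun a => (List.range WN).map (g a)))[pyn * WN + pxn]? = some (g pyn pxn) := by
  have hpre : ((List.range pyn).map (fun i => ((List.range WN).map (g i)).length)).sum = pyn * WN := by
    simp [sum_map_const_nat]
  rw [show pyn * WN + pxn = ((List.range pyn).map (fun i => ((List.range WN).map (g i)).length)).sum + pxn by rw [hpre]]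
  rw [get_flatMap_range HN pyn pxn _ hy (by simpa using hx)]
  simp [List.getElem?_map, List.getElem?_range hx]

-- ---- ceiling-division bounds ----

theorem ceil_bound (w tile : Int) (ht : 0 < tile) :
    w ≤ PySem.Int.floordiv (w + tile - 1) tile * tile := by
  have h1 := PySem.Int.floordiv_mul_add_mod (w + tile - 1) tile
  have h2 := PySem.Int.mod_nonneg (w + tile - 1) ht
  have h3 := PySem.Int.mod_lt (w + tile - 1) ht
  omega

theorem ceil_nonpos (w tile : Int) (ht : 0 < tile) (hw : w ≤ 0) :
    PySem.Int.floordiv (w + tile - 1) tile ≤ 0 := by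
  have h1 := PySem.Int.floordiv_mul_add_mod (w + tile - 1) tile
  have h2 := PySem.Int.mod_nonneg (w + tile - 1) ht
  by_contra hq
  push_neg at hq
  have h4 : 1 * tile ≤ PySem.Int.floordiv (w + tile - 1) tile * tile :=
    mul_le_mul_of_nonneg_right hq (le_of_lt ht)
  omega

-- ---- prefix-sum closed forms ----

theorem row_len (W H T TX TY : Nat) (hT : 0 < T) (hW : W ≤ TX * T) (hH : H ≤ TY * T) :
    ((List.range TY).map (fun a => ((List.range TX).map (fun b => cInN H T a * cInN W T b)).sum)).sum = H * W := by
  simp only [cInN]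
  have hin : ∀ a : Nat, ((List.range TX).map (fun b => min T (H - a * T) * min T (W - b * T))).sum
      = min T (H - a * T) * W := by
    intro a
    rw [List.sum_map_mul_left, sum_min_eq_total T W TX hT hW]
  rw [List.map_congr_left (fun a _ => hin a)]
  rw [List.sum_map_mul_right, sum_min_eq_total T H TY hT hH]

theorem col_len (W H T TX TY : Nat) (hT : 0 < T) (hW : W ≤ TX * T) (hH : H ≤ TY * T) :
    ((List.range TX).map (fun a => ((List.range TY).map (fun b => cInN H T b * cInN W T a)).sum)).sum = H * W := by
  simp only [cInN]
  have hin : ∀ a : Nat, ((List.range TY).map (fun b => min T (H - b * T) * min T (W - a * T))).sum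
      = H * min T (W - a * T) := by
    intro a
    rw [List.sum_map_mul_right, sum_min_eq_total T H TY hT hH]
  rw [List.map_congr_left (fun a _ => hin a)]
  rw [List.sum_map_mul_left, sum_min_eq_total T W TX hT hW]

theorem row_prefix1 (W H T TX : Nat) (hT : 0 < T) (hW : W ≤ TX * T) (a : Nat) (ha : a * T ≤ H) :
    ((List.range a).map (fun i => ((List.range TX).map (fun j => cInN H T i * cInN W T j)).sum)).sum = a * T * W := by
  simp only [cInN]
  have hin : ∀ i : Nat, ((List.range TX).map (fun j => min T (H - i * T) * min T (W - j * T))).sum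
      = min T (H - i * T) * W := by
    intro i
    rw [List.sum_map_mul_left, sum_min_eq_total T W TX hT hW]
  rw [List.map_congr_left (fun i _ => hin i)]
  rw [List.sum_map_mul_right, sum_min_eq_of_le T H a ha]

theorem row_prefix2 (W H T : Nat) (a b : Nat) (hb : b * T ≤ W) :
    ((List.range b).map (fun j => cInN H T a * cInN W T j)).sum = cInN H T a * (b * T) := by
  simp only [cInN]
  rw [List.sum_map_mul_left, sum_min_eq_of_le T W b hb]

theorem col_prefix1 (W H T TY : Nat) (hT : 0 < T) (hH : H ≤ TY * T) (a : Nat) (ha : a * T ≤ W) :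
    ((List.range a).map (fun i => ((List.range TY).map (fun j => cInN H T j * cInN W T i)).sum)).sum = H * (a * T) := by
  simp only [cInN]
  have hin : ∀ i : Nat, ((List.range TY).map (fun j => min T (H - j * T) * min T (W - i * T))).sum
      = H * min T (W - i * T) := by
    intro i
    rw [List.sum_map_mul_right, sum_min_eq_total T H TY hT hH]
  rw [List.map_congr_left (fun i _ => hin i)]
  rw [List.sum_map_mul_left, sum_min_eq_of_le T W a ha]

theorem col_prefix2 (W H T : Nat) (a b : Nat) (hb : b * T ≤ H) :
    ((List.range b).map (fun j => cInN H T j * cInN W T a)).sum = b * T * cInN W T a := by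
  simp only [cInN]
  rw [List.sum_map_mul_right, sum_min_eq_of_le T H b hb]

-- closed-form word index, Nat side (row / col orders)
def Frow (W H T j : Nat) : Nat :=
  j / W / T * T * W + (cInN H T (j / W / T) * (j % W / T * T) + (j / W % T * cInN W T (j % W / T) + j % W % T))

def Fcol (W H T j : Nat) : Nat :=
  H * (j % W / T * T) + (j / W / T * T * cInN W T (j % W / T) + (j / W % T * cInN W T (j % W / T) + j % W % T))

theorem row_get (W H T TX TY : Nat) (hT : 0 < T) (hW0 : 0 < W) (hWTX : W ≤ TX * T) (hHTY : H ≤ TY * T)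
    (j : Nat) (hj : j < H * W) :
    (quadL TY TX (fun a _ => cInN H T a) (fun _ b => cInN W T b)
      (fun a b y x => (a * T + y) * W + (b * T + x)))[Frow W H T j]? = some j := by
  unfold Frow
  have hpyn : j / W < H := (Nat.div_lt_iff_lt_mul hW0).mpr hj
  have hpxn : j % W < W := Nat.mod_lt _ hW0
  have hj_eq : j / W * W + j % W = j := by rw [Nat.mul_comm]; exact Nat.div_add_mod j W
  have hsy : j / W / T * T + j / W % T = j / W := by rw [Nat.mul_comm]; exact Nat.div_add_mod _ T
  have hsx : j % W / T * T + j % W % T = j % W := by rw [Nat.mul_comm]; exact Nat.div_add_mod _ T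
  have hyT : j / W % T < T := Nat.mod_lt _ hT
  have hxT : j % W % T < T := Nat.mod_lt _ hT
  have haT : j / W / T * T ≤ H := le_of_lt (lt_of_le_of_lt (Nat.le.intro hsy) hpyn)
  have hbT : j % W / T * T ≤ W := le_of_lt (lt_of_le_of_lt (Nat.le.intro hsx) hpxn)
  have ha : j / W / T < TY := by
    refine lt_of_mul_lt_mul_right ?_ (Nat.zero_le T)
    calc j / W / T * T ≤ j / W := Nat.le.intro hsy
      _ < H := hpyn
      _ ≤ TY * T := hHTY
  have hb : j % W / T < TX := by
    refine lt_of_mul_lt_mul_right ?_ (Nat.zero_le T)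
    calc j % W / T * T ≤ j % W := Nat.le.intro hsx
      _ < W := hpxn
      _ ≤ TX * T := hWTX
  have hy : j / W % T < cInN H T (j / W / T) := by
    have h1 : j / W / T * T + j / W % T < H := lt_of_le_of_lt (le_of_eq hsy) hpyn
    exact lt_min hyT (Nat.lt_sub_of_add_lt (by rw [Nat.add_comm]; exact h1))
  have hx : j % W % T < cInN W T (j % W / T) := by
    have h1 : j % W / T * T + j % W % T < W := lt_of_le_of_lt (le_of_eq hsx) hpxn
    exact lt_min hxT (Nat.lt_sub_of_add_lt (by rw [Nat.add_comm]; exact h1))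
  have hq := quad_get TY TX (fun a _ => cInN H T a) (fun _ b => cInN W T b)
      (fun a b y x => (a * T + y) * W + (b * T + x))
      (j / W / T) (j % W / T) (j / W % T) (j % W % T) ha hb hy hx
      (j / W / T * T * W) (cInN H T (j / W / T) * (j % W / T * T))
      (row_prefix1 W H T TX hT hWTX (j / W / T) haT)
      (row_prefix2 W H T (j / W / T) (j % W / T) hbT)
  simp only at hq
  rw [hsy, hsx, hj_eq] at hq
  exact hq

theorem col_get (W H T TX TY : Nat) (hT : 0 < T) (hW0 : 0 < W) (hWTX : W ≤ TX * T) (hHTY : H ≤ TY * T)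
    (j : Nat) (hj : j < H * W) :
    (quadL TX TY (fun _ b => cInN H T b) (fun a _ => cInN W T a)
      (fun a b y x => (b * T + y) * W + (a * T + x)))[Fcol W H T j]? = some j := by
  unfold Fcol
  have hpyn : j / W < H := (Nat.div_lt_iff_lt_mul hW0).mpr hj
  have hpxn : j % W < W := Nat.mod_lt _ hW0
  have hj_eq : j / W * W + j % W = j := by rw [Nat.mul_comm]; exact Nat.div_add_mod j W
  have hsy : j / W / T * T + j / W % T = j / W := by rw [Nat.mul_comm]; exact Nat.div_add_mod _ T
  have hsx : j % W / T * T + j % W % T = j % W := by rw [Nat.mul_comm]; exact Nat.div_add_mod _ T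
  have hyT : j / W % T < T := Nat.mod_lt _ hT
  have hxT : j % W % T < T := Nat.mod_lt _ hT
  have haT : j / W / T * T ≤ H := le_of_lt (lt_of_le_of_lt (Nat.le.intro hsy) hpyn)
  have hbT : j % W / T * T ≤ W := le_of_lt (lt_of_le_of_lt (Nat.le.intro hsx) hpxn)
  have ha : j / W / T < TY := by
    refine lt_of_mul_lt_mul_right ?_ (Nat.zero_le T)
    calc j / W / T * T ≤ j / W := Nat.le.intro hsy
      _ < H := hpyn
      _ ≤ TY * T := hHTY
  have hb : j % W / T < TX := by
    refine lt_of_mul_lt_mul_right ?_ (Nat.zero_le T)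
    calc j % W / T * T ≤ j % W := Nat.le.intro hsx
      _ < W := hpxn
      _ ≤ TX * T := hWTX
  have hy : j / W % T < cInN H T (j / W / T) := by
    have h1 : j / W / T * T + j / W % T < H := lt_of_le_of_lt (le_of_eq hsy) hpyn
    exact lt_min hyT (Nat.lt_sub_of_add_lt (by rw [Nat.add_comm]; exact h1))
  have hx : j % W % T < cInN W T (j % W / T) := by
    have h1 : j % W / T * T + j % W % T < W := lt_of_le_of_lt (le_of_eq hsx) hpxn
    exact lt_min hxT (Nat.lt_sub_of_add_lt (by rw [Nat.add_comm]; exact h1))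
  have hq := quad_get TX TY (fun _ b => cInN H T b) (fun a _ => cInN W T a)
      (fun a b y x => (b * T + y) * W + (a * T + x))
      (j % W / T) (j / W / T) (j / W % T) (j % W % T) hb ha hy hx
      (H * (j % W / T * T)) (j / W / T * T * cInN W T (j % W / T))
      (col_prefix1 W H T TY hT hHTY (j % W / T) hbT)
      (col_prefix2 W H T (j % W / T) (j / W / T) haT)
  simp only at hq
  rw [hsy, hsx, hj_eq] at hq
  exact hq

-- ---- the three cases of the equivalence ----

theorem min_cast_cIn (T H a : Nat) (haT : a * T ≤ H) :
    min ((T : Nat) : Int) ((H : Int) - (a : Int) * (T : Int)) = ((cInN H T a : Nat) : Int) := by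
  simp only [cInN]
  rw [Nat.cast_min, Nat.cast_sub haT]
  congr 1
  all_goals (push_cast; ring)

theorem eq_main_row (words : List Int) (w h tile : Int) (ord : String)
    (hw : 0 < w) (hh : 0 < h) (ht : 0 < tile) (hord : (ord == "col") = false) :
    detile_words words w h tile ord = detile_words_alt words w h tile ord := by
  obtain ⟨W, rfl⟩ : ∃ n : Nat, (n : Int) = w := ⟨w.toNat, Int.toNat_of_nonneg (le_of_lt hw)⟩
  obtain ⟨H, rfl⟩ : ∃ n : Nat, (n : Int) = h := ⟨h.toNat, Int.toNat_of_nonneg (le_of_lt hh)⟩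
  obtain ⟨T, rfl⟩ : ∃ n : Nat, (n : Int) = tile := ⟨tile.toNat, Int.toNat_of_nonneg (le_of_lt ht)⟩
  have hW0 : 0 < W := by exact_mod_cast hw
  have hH0 : 0 < H := by exact_mod_cast hh
  have hT0 : 0 < T := by exact_mod_cast ht
  have hcx : (W : Int) ≤ PySem.Int.floordiv ((W : Int) + (T : Int) - 1) (T : Int) * (T : Int) :=
    ceil_bound _ _ ht
  have hcy : (H : Int) ≤ PySem.Int.floordiv ((H : Int) + (T : Int) - 1) (T : Int) * (T : Int) :=
    ceil_bound _ _ ht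
  have htxpos : 0 ≤ PySem.Int.floordiv ((W : Int) + (T : Int) - 1) (T : Int) := by
    by_contra hq
    push_neg at hq
    have h4 := mul_le_mul_of_nonneg_right (le_of_lt hq) (le_of_lt ht)
    rw [zero_mul] at h4
    omega
  have htypos : 0 ≤ PySem.Int.floordiv ((H : Int) + (T : Int) - 1) (T : Int) := by
    by_contra hq
    push_neg at hq
    have h4 := mul_le_mul_of_nonneg_right (le_of_lt hq) (le_of_lt ht)
    rw [zero_mul] at h4
    omega
  have hWTX : W ≤ (PySem.Int.floordiv ((W : Int) + (T : Int) - 1) (T : Int)).toNat * T := by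
    have h1 : (W : Int) ≤ (((PySem.Int.floordiv ((W : Int) + (T : Int) - 1) (T : Int)).toNat * T : Nat) : Int) := by
      push_cast
      rw [Int.toNat_of_nonneg htxpos]
      exact hcx
    exact_mod_cast h1
  have hHTY : H ≤ (PySem.Int.floordiv ((H : Int) + (T : Int) - 1) (T : Int)).toNat * T := by
    have h1 : (H : Int) ≤ (((PySem.Int.floordiv ((H : Int) + (T : Int) - 1) (T : Int)).toNat * T : Nat) : Int) := by
      push_cast
      rw [Int.toNat_of_nonneg htypos]
      exact hcy
    exact_mod_cast h1
  have hstep : detile_words words (W : Int) (H : Int) (T : Int) ord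
      = (let positions := ((PySem.List.pyRange 0 (PySem.Int.floordiv ((H : Int) + (T : Int) - 1) (T : Int)) 1).flatMap
            (fun ty => (PySem.List.pyRange 0 (PySem.Int.floordiv ((W : Int) + (T : Int) - 1) (T : Int)) 1).map (fun tx => (tx, ty)))).flatMap
            (fun txy => ((PySem.List.pyRange 0 (T : Int) 1).filter (fun y => decide (txy.2 * (T : Int) + y < (H : Int)))).flatMap (fun y =>
              ((PySem.List.pyRange 0 (T : Int) 1).filter (fun x => decide (txy.1 * (T : Int) + x < (W : Int)))).map (fun x =>
                (txy.2 * (T : Int) + y) * (W : Int) + (txy.1 * (T : Int) + x))));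
         if positions.length ≠ words.length then none
         else some ((positions.zip words).foldl (fun out pw => PySem.List.pySetD out pw.1 pw.2)
              (List.replicate ((W : Int) * (H : Int)).toNat 0))) := by
    unfold detile_words
    simp only [hord, Bool.false_eq_true, if_false]
    exact detile_fold_eq words (W : Int) (H : Int) (T : Int) _
  rw [hstep]
  rw [P_norm_row (W : Int) (H : Int) (T : Int) (PySem.Int.floordiv ((H : Int) + (T : Int) - 1) (T : Int))
      (PySem.Int.floordiv ((W : Int) + (T : Int) - 1) (T : Int)) (by positivity) ht]
  simp only [Int.toNat_natCast]
  set TX := (PySem.Int.floordiv ((W : Int) + (T : Int) - 1) (T : Int)).toNat with hTXdef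
  set TY := (PySem.Int.floordiv ((H : Int) + (T : Int) - 1) (T : Int)).toNat with hTYdef
  have hQlen : (quadL TY TX (fun a _ => cInN H T a) (fun _ b => cInN W T b)
      (fun a b y x => (a * T + y) * W + (b * T + x))).length = H * W := by
    rw [quad_len, row_len W H T TX TY hT0 hWTX hHTY]
  have hBmain : detile_words_alt words (W : Int) (H : Int) (T : Int) ord
      = if (words.length : Int) ≠ (W : Int) * (H : Int) then none
        else some ((PySem.List.pyRange 0 (H : Int) 1).flatMap (fun py =>
          (PySem.List.pyRange 0 (W : Int) 1).map (fun px =>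
            PySem.List.pyGetD words (wordIndexB (W : Int) (H : Int) (T : Int) ord py px) 0))) := by
    unfold detile_words_alt
    have hc : (0 < (T : Int) ∧ 0 < (W : Int) ∧ 0 < (H : Int)) := ⟨ht, hw, hh⟩
    simp only [if_pos hc]
    by_cases hlen : (words.length : Int) ≠ (W : Int) * (H : Int)
    · simp [hlen]
    · have hne : (W : Int) * (H : Int) ≠ 0 := ne_of_gt (mul_pos hw hh)
      simp [hlen, hne]
  rw [hBmain]
  have hcond : ((words.length : Int) ≠ (W : Int) * (H : Int)) ↔ words.length ≠ H * W := by
    rw [show (W : Int) * (H : Int) = ((H * W : Nat) : Int) by push_cast; ring]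
    exact not_congr Int.natCast_inj
  by_cases hL : words.length = H * W
  · rw [if_neg (by rw [List.length_map, hQlen]; exact not_not.mpr hL.symm),
      if_neg (fun hx => (hcond.mp hx) hL)]
    congr 1
    have hinit : ((W : Int) * (H : Int)).toNat = W * H := by
      rw [show (W : Int) * (H : Int) = ((W * H : Nat) : Int) by push_cast; ring]
      exact Int.toNat_natCast _
    rw [scatter_cast]
    rw [B_norm (W : Int) (H : Int) (fun py px => PySem.List.pyGetD words (wordIndexB (W : Int) (H : Int) (T : Int) ord py px) 0)]
    simp only [Int.toNat_natCast]
    have hvals : ∀ q ∈ quadL TY TX (fun a _ => cInN H T a) (fun _ b => cInN W T b)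
        (fun a b y x => (a * T + y) * W + (b * T + x)), q < W * H := by
      intro q hq
      obtain ⟨a, b, y, x, ha, hb, hy, hx, rfl⟩ := quad_mem _ _ _ _ _ _ hq
      have h1 : y < H - a * T := lt_of_lt_of_le hy (min_le_right _ _)
      have h2 : x < W - b * T := lt_of_lt_of_le hx (min_le_right _ _)
      have h3 : a * T + y < H := by
        rw [Nat.add_comm]
        exact Nat.add_lt_of_lt_sub h1
      have h4 : b * T + x < W := by
        rw [Nat.add_comm]
        exact Nat.add_lt_of_lt_sub h2
      calc (a * T + y) * W + (b * T + x)
          < (a * T + y) * W + W := Nat.add_lt_add_left h4 _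
        _ = (a * T + y + 1) * W := by ring
        _ ≤ H * W := Nat.mul_le_mul_right _ (Nat.succ_le_of_lt h3)
        _ = W * H := Nat.mul_comm _ _
    have hQnd : (quadL TY TX (fun a _ => cInN H T a) (fun _ b => cInN W T b)
        (fun a b y x => (a * T + y) * W + (b * T + x))).Nodup := by
      apply nodup_of_inverse _ (Frow W H T)
      intro j hj
      rw [hQlen] at hj
      have hg := row_get W H T TX TY hT0 hW0 hWTX hHTY j hj
      obtain ⟨hlt, -⟩ := List.getElem?_eq_some_iff.mp hg
      exact ⟨hlt, hg⟩
    apply List.ext_getElem?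
    intro j
    by_cases hjlt : j < H * W
    · have hg := row_get W H T TX TY hT0 hW0 hWTX hHTY j hjlt
      have hFlt : Frow W H T j < words.length := by
        obtain ⟨hlt, -⟩ := List.getElem?_eq_some_iff.mp hg
        rw [hQlen] at hlt
        rw [hL]
        exact hlt
      have hA := scatter_get _ words (List.replicate ((W : Int) * (H : Int)).toNat 0)
          (Frow W H T j) j (words[Frow W H T j])
          hQnd (fun q hq => by rw [List.length_replicate, hinit]; exact hvals q hq)
          hg (List.getElem?_eq_getElem hFlt)
      rw [hA]
      have hpyn : j / W < H := (Nat.div_lt_iff_lt_mul hW0).mpr hjlt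
      have hpxn : j % W < W := Nat.mod_lt _ hW0
      have hj_eq : j / W * W + j % W = j := by
        rw [Nat.mul_comm]
        exact Nat.div_add_mod j W
      conv_rhs => rw [← hj_eq]
      rw [B_get H W _ (j / W) (j % W) hpyn hpxn]
      have hsy : j / W / T * T + j / W % T = j / W := by
        rw [Nat.mul_comm]
        exact Nat.div_add_mod _ _
      have hsx : j % W / T * T + j % W % T = j % W := by
        rw [Nat.mul_comm]
        exact Nat.div_add_mod _ _
      have haT : j / W / T * T ≤ H := le_of_lt (lt_of_le_of_lt (Nat.le.intro hsy) hpyn)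
      have hbT : j % W / T * T ≤ W := le_of_lt (lt_of_le_of_lt (Nat.le.intro hsx) hpxn)
      have hidx : wordIndexB (W : Int) (H : Int) (T : Int) ord ((j / W : Nat) : Int) ((j % W : Nat) : Int)
          = ((Frow W H T j : Nat) : Int) := by
        unfold wordIndexB
        simp only [hord, Bool.false_eq_true, if_false, PySem.Int.floordiv_natCast, PySem.Int.mod_natCast]
        rw [show ((j / W / T : Nat) : Int) * (T : Int) = ((j / W / T * T : Nat) : Int) by push_cast; ring,
          show ((j % W / T : Nat) : Int) * (T : Int) = ((j % W / T * T : Nat) : Int) by push_cast; ring]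
        rw [show min ((T : Nat) : Int) ((H : Int) - ((j / W / T * T : Nat) : Int))
              = ((cInN H T (j / W / T) : Nat) : Int) by
            rw [← min_cast_cIn T H (j / W / T) haT]; push_cast; ring_nf,
          show min ((T : Nat) : Int) ((W : Int) - ((j % W / T * T : Nat) : Int))
              = ((cInN W T (j % W / T) : Nat) : Int) by
            rw [← min_cast_cIn T W (j % W / T) hbT]; push_cast; ring_nf]
        simp only [Frow]
        push_cast
        ring
      rw [hidx, PySem.List.pyGetD_natCast]
      rw [List.getD_eq_getElem?_getD, List.getElem?_eq_getElem hFlt]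
      rfl
    · rw [List.getElem?_eq_none, List.getElem?_eq_none]
      · rw [len_flatMap_map]
        omega
      · rw [scatter_length, List.length_replicate, hinit]
        rw [Nat.mul_comm]
        omega
  · rw [if_pos (by rw [List.length_map, hQlen]; exact fun hx => hL hx.symm), if_pos (hcond.mpr hL)]

theorem eq_main_col (words : List Int) (w h tile : Int) (ord : String)
    (hw : 0 < w) (hh : 0 < h) (ht : 0 < tile) (hord : (ord == "col") = true) :
    detile_words words w h tile ord = detile_words_alt words w h tile ord := by
  obtain ⟨W, rfl⟩ : ∃ n : Nat, (n : Int) = w := ⟨w.toNat, Int.toNat_of_nonneg (le_of_lt hw)⟩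
  obtain ⟨H, rfl⟩ : ∃ n : Nat, (n : Int) = h := ⟨h.toNat, Int.toNat_of_nonneg (le_of_lt hh)⟩
  obtain ⟨T, rfl⟩ : ∃ n : Nat, (n : Int) = tile := ⟨tile.toNat, Int.toNat_of_nonneg (le_of_lt ht)⟩
  have hW0 : 0 < W := by exact_mod_cast hw
  have hH0 : 0 < H := by exact_mod_cast hh
  have hT0 : 0 < T := by exact_mod_cast ht
  have hcx : (W : Int) ≤ PySem.Int.floordiv ((W : Int) + (T : Int) - 1) (T : Int) * (T : Int) :=
    ceil_bound _ _ ht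
  have hcy : (H : Int) ≤ PySem.Int.floordiv ((H : Int) + (T : Int) - 1) (T : Int) * (T : Int) :=
    ceil_bound _ _ ht
  have htxpos : 0 ≤ PySem.Int.floordiv ((W : Int) + (T : Int) - 1) (T : Int) := by
    by_contra hq
    push_neg at hq
    have h4 := mul_le_mul_of_nonneg_right (le_of_lt hq) (le_of_lt ht)
    rw [zero_mul] at h4
    omega
  have htypos : 0 ≤ PySem.Int.floordiv ((H : Int) + (T : Int) - 1) (T : Int) := by
    by_contra hq
    push_neg at hq
    have h4 := mul_le_mul_of_nonneg_right (le_of_lt hq) (le_of_lt ht)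
    rw [zero_mul] at h4
    omega
  have hWTX : W ≤ (PySem.Int.floordiv ((W : Int) + (T : Int) - 1) (T : Int)).toNat * T := by
    have h1 : (W : Int) ≤ (((PySem.Int.floordiv ((W : Int) + (T : Int) - 1) (T : Int)).toNat * T : Nat) : Int) := by
      push_cast
      rw [Int.toNat_of_nonneg htxpos]
      exact hcx
    exact_mod_cast h1
  have hHTY : H ≤ (PySem.Int.floordiv ((H : Int) + (T : Int) - 1) (T : Int)).toNat * T := by
    have h1 : (H : Int) ≤ (((PySem.Int.floordiv ((H : Int) + (T : Int) - 1) (T : Int)).toNat * T : Nat) : Int) := by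
      push_cast
      rw [Int.toNat_of_nonneg htypos]
      exact hcy
    exact_mod_cast h1
  have hstep : detile_words words (W : Int) (H : Int) (T : Int) ord
      = (let positions := ((PySem.List.pyRange 0 (PySem.Int.floordiv ((W : Int) + (T : Int) - 1) (T : Int)) 1).flatMap
            (fun tx => (PySem.List.pyRange 0 (PySem.Int.floordiv ((H : Int) + (T : Int) - 1) (T : Int)) 1).map (fun ty => (tx, ty)))).flatMap
            (fun txy => ((PySem.List.pyRange 0 (T : Int) 1).filter (fun y => decide (txy.2 * (T : Int) + y < (H : Int)))).flatMap (fun y =>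
              ((PySem.List.pyRange 0 (T : Int) 1).filter (fun x => decide (txy.1 * (T : Int) + x < (W : Int)))).map (fun x =>
                (txy.2 * (T : Int) + y) * (W : Int) + (txy.1 * (T : Int) + x))));
         if positions.length ≠ words.length then none
         else some ((positions.zip words).foldl (fun out pw => PySem.List.pySetD out pw.1 pw.2)
              (List.replicate ((W : Int) * (H : Int)).toNat 0))) := by
    unfold detile_words
    simp only [hord, if_true]
    exact detile_fold_eq words (W : Int) (H : Int) (T : Int) _
  rw [hstep]
  rw [P_norm_col (W : Int) (H : Int) (T : Int) (PySem.Int.floordiv ((H : Int) + (T : Int) - 1) (T : Int))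
      (PySem.Int.floordiv ((W : Int) + (T : Int) - 1) (T : Int)) (by positivity) ht]
  simp only [Int.toNat_natCast]
  set TX := (PySem.Int.floordiv ((W : Int) + (T : Int) - 1) (T : Int)).toNat with hTXdef
  set TY := (PySem.Int.floordiv ((H : Int) + (T : Int) - 1) (T : Int)).toNat with hTYdef
  have hQlen : (quadL TX TY (fun _ b => cInN H T b) (fun a _ => cInN W T a)
      (fun a b y x => (b * T + y) * W + (a * T + x))).length = H * W := by
    rw [quad_len, col_len W H T TX TY hT0 hWTX hHTY]
  have hBmain : detile_words_alt words (W : Int) (H : Int) (T : Int) ord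
      = if (words.length : Int) ≠ (W : Int) * (H : Int) then none
        else some ((PySem.List.pyRange 0 (H : Int) 1).flatMap (fun py =>
          (PySem.List.pyRange 0 (W : Int) 1).map (fun px =>
            PySem.List.pyGetD words (wordIndexB (W : Int) (H : Int) (T : Int) ord py px) 0))) := by
    unfold detile_words_alt
    have hc : (0 < (T : Int) ∧ 0 < (W : Int) ∧ 0 < (H : Int)) := ⟨ht, hw, hh⟩
    simp only [if_pos hc]
    by_cases hlen : (words.length : Int) ≠ (W : Int) * (H : Int)
    · simp [hlen]
    · have hne : (W : Int) * (H : Int) ≠ 0 := ne_of_gt (mul_pos hw hh)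
      simp [hlen, hne]
  rw [hBmain]
  have hcond : ((words.length : Int) ≠ (W : Int) * (H : Int)) ↔ words.length ≠ H * W := by
    rw [show (W : Int) * (H : Int) = ((H * W : Nat) : Int) by push_cast; ring]
    exact not_congr Int.natCast_inj
  by_cases hL : words.length = H * W
  · rw [if_neg (by rw [List.length_map, hQlen]; exact not_not.mpr hL.symm),
      if_neg (fun hx => (hcond.mp hx) hL)]
    congr 1
    have hinit : ((W : Int) * (H : Int)).toNat = W * H := by
      rw [show (W : Int) * (H : Int) = ((W * H : Nat) : Int) by push_cast; ring]
      exact Int.toNat_natCast _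
    rw [scatter_cast]
    rw [B_norm (W : Int) (H : Int) (fun py px => PySem.List.pyGetD words (wordIndexB (W : Int) (H : Int) (T : Int) ord py px) 0)]
    simp only [Int.toNat_natCast]
    have hvals : ∀ q ∈ quadL TX TY (fun _ b => cInN H T b) (fun a _ => cInN W T a)
        (fun a b y x => (b * T + y) * W + (a * T + x)), q < W * H := by
      intro q hq
      obtain ⟨a, b, y, x, ha, hb, hy, hx, rfl⟩ := quad_mem _ _ _ _ _ _ hq
      have h1 : y < H - b * T := lt_of_lt_of_le hy (min_le_right _ _)
      have h2 : x < W - a * T := lt_of_lt_of_le hx (min_le_right _ _)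
      have h3 : b * T + y < H := by
        rw [Nat.add_comm]
        exact Nat.add_lt_of_lt_sub h1
      have h4 : a * T + x < W := by
        rw [Nat.add_comm]
        exact Nat.add_lt_of_lt_sub h2
      calc (b * T + y) * W + (a * T + x)
          < (b * T + y) * W + W := Nat.add_lt_add_left h4 _
        _ = (b * T + y + 1) * W := by ring
        _ ≤ H * W := Nat.mul_le_mul_right _ (Nat.succ_le_of_lt h3)
        _ = W * H := Nat.mul_comm _ _
    have hQnd : (quadL TX TY (fun _ b => cInN H T b) (fun a _ => cInN W T a)
        (fun a b y x => (b * T + y) * W + (a * T + x))).Nodup := by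
      apply nodup_of_inverse _ (Fcol W H T)
      intro j hj
      rw [hQlen] at hj
      have hg := col_get W H T TX TY hT0 hW0 hWTX hHTY j hj
      obtain ⟨hlt, -⟩ := List.getElem?_eq_some_iff.mp hg
      exact ⟨hlt, hg⟩
    apply List.ext_getElem?
    intro j
    by_cases hjlt : j < H * W
    · have hg := col_get W H T TX TY hT0 hW0 hWTX hHTY j hjlt
      have hFlt : Fcol W H T j < words.length := by
        obtain ⟨hlt, -⟩ := List.getElem?_eq_some_iff.mp hg
        rw [hQlen] at hlt
        rw [hL]
        exact hlt
      have hA := scatter_get _ words (List.replicate ((W : Int) * (H : Int)).toNat 0)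
          (Fcol W H T j) j (words[Fcol W H T j])
          hQnd (fun q hq => by rw [List.length_replicate, hinit]; exact hvals q hq)
          hg (List.getElem?_eq_getElem hFlt)
      rw [hA]
      have hpyn : j / W < H := (Nat.div_lt_iff_lt_mul hW0).mpr hjlt
      have hpxn : j % W < W := Nat.mod_lt _ hW0
      have hj_eq : j / W * W + j % W = j := by
        rw [Nat.mul_comm]
        exact Nat.div_add_mod j W
      conv_rhs => rw [← hj_eq]
      rw [B_get H W _ (j / W) (j % W) hpyn hpxn]
      have hsy : j / W / T * T + j / W % T = j / W := by
        rw [Nat.mul_comm]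
        exact Nat.div_add_mod _ _
      have hsx : j % W / T * T + j % W % T = j % W := by
        rw [Nat.mul_comm]
        exact Nat.div_add_mod _ _
      have haT : j / W / T * T ≤ H := le_of_lt (lt_of_le_of_lt (Nat.le.intro hsy) hpyn)
      have hbT : j % W / T * T ≤ W := le_of_lt (lt_of_le_of_lt (Nat.le.intro hsx) hpxn)
      have hidx : wordIndexB (W : Int) (H : Int) (T : Int) ord ((j / W : Nat) : Int) ((j % W : Nat) : Int)
          = ((Fcol W H T j : Nat) : Int) := by
        unfold wordIndexB
        simp only [hord, if_true, PySem.Int.floordiv_natCast, PySem.Int.mod_natCast]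
        rw [show ((j / W / T : Nat) : Int) * (T : Int) = ((j / W / T * T : Nat) : Int) by push_cast; ring,
          show ((j % W / T : Nat) : Int) * (T : Int) = ((j % W / T * T : Nat) : Int) by push_cast; ring]
        rw [show min ((T : Nat) : Int) ((W : Int) - ((j % W / T * T : Nat) : Int))
              = ((cInN W T (j % W / T) : Nat) : Int) by
            rw [← min_cast_cIn T W (j % W / T) hbT]; push_cast; ring_nf]
        simp only [Fcol]
        push_cast
        ring
      rw [hidx, PySem.List.pyGetD_natCast]
      rw [List.getD_eq_getElem?_getD, List.getElem?_eq_getElem hFlt]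
      rfl
    · rw [List.getElem?_eq_none, List.getElem?_eq_none]
      · rw [len_flatMap_map]
        omega
      · rw [scatter_length, List.length_replicate, hinit]
        rw [Nat.mul_comm]
        omega
  · rw [if_pos (by rw [List.length_map, hQlen]; exact fun hx => hL hx.symm), if_pos (hcond.mpr hL)]

theorem eq_degen (words : List Int) (w h tile : Int) (ord : String)
    (ht : tile ≠ 0) (hdeg : ¬(0 < tile ∧ 0 < w ∧ 0 < h)) :
    detile_words words w h tile ord = detile_words_alt words w h tile ord := by
  have hstep : detile_words words w h tile ord
      = (let positions := (if (ord == "col") = true then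
            (PySem.List.pyRange 0 (PySem.Int.floordiv (w + tile - 1) tile) 1).flatMap
              (fun tx => (PySem.List.pyRange 0 (PySem.Int.floordiv (h + tile - 1) tile) 1).map (fun ty => (tx, ty)))
          else
            (PySem.List.pyRange 0 (PySem.Int.floordiv (h + tile - 1) tile) 1).flatMap
              (fun ty => (PySem.List.pyRange 0 (PySem.Int.floordiv (w + tile - 1) tile) 1).map (fun tx => (tx, ty)))).flatMap
            (fun txy => ((PySem.List.pyRange 0 tile 1).filter (fun y => decide (txy.2 * tile + y < h))).flatMap (fun y =>
              ((PySem.List.pyRange 0 tile 1).filter (fun x => decide (txy.1 * tile + x < w))).map (fun x =>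
                (txy.2 * tile + y) * w + (txy.1 * tile + x))));
         if positions.length ≠ words.length then none
         else some ((positions.zip words).foldl (fun out pw => PySem.List.pySetD out pw.1 pw.2)
              (List.replicate (w * h).toNat 0))) := by
    unfold detile_words
    exact detile_fold_eq words w h tile _
  rw [hstep]
  have hPnil : ((if (ord == "col") = true then
        (PySem.List.pyRange 0 (PySem.Int.floordiv (w + tile - 1) tile) 1).flatMap
          (fun tx => (PySem.List.pyRange 0 (PySem.Int.floordiv (h + tile - 1) tile) 1).map (fun ty => (tx, ty)))
      else
        (PySem.List.pyRange 0 (PySem.Int.floordiv (h + tile - 1) tile) 1).flatMap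
          (fun ty => (PySem.List.pyRange 0 (PySem.Int.floordiv (w + tile - 1) tile) 1).map (fun tx => (tx, ty)))).flatMap
        (fun txy => ((PySem.List.pyRange 0 tile 1).filter (fun y => decide (txy.2 * tile + y < h))).flatMap (fun y =>
          ((PySem.List.pyRange 0 tile 1).filter (fun x => decide (txy.1 * tile + x < w))).map (fun x =>
            (txy.2 * tile + y) * w + (txy.1 * tile + x))))) = [] := by
    rcases lt_or_gt_of_ne ht with htneg | htpos
    · rw [PySem.List.pyRange_one_eq_nil (le_of_lt htneg)]
      simp
    · have hwh : w ≤ 0 ∨ h ≤ 0 := by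
        by_contra hq
        push_neg at hq
        exact hdeg ⟨htpos, hq.1, hq.2⟩
      rcases hwh with hw0 | hh0
      · have htx : PySem.Int.floordiv (w + tile - 1) tile ≤ 0 := ceil_nonpos w tile htpos hw0
        rw [PySem.List.pyRange_one_eq_nil htx]
        by_cases hc : (ord == "col") = true <;> simp [hc]
      · have hty : PySem.Int.floordiv (h + tile - 1) tile ≤ 0 := ceil_nonpos h tile htpos hh0
        rw [PySem.List.pyRange_one_eq_nil hty]
        by_cases hc : (ord == "col") = true <;> simp [hc]
  rw [hPnil]
  unfold detile_words_alt
  rw [if_neg hdeg]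
  by_cases hl : words.length = 0
  · simp [hl]
  · simp [Ne.symm hl]
    exact fun hx => hl (by simp [hx])


-- ===== VERDICT (by name: the statement is the Claim_ definition above) =====
theorem detile_words_spec : Claim_equal_detile_words := by
  intro words w h tile ord _ hpre
  unfold Spec_detile_words
  by_cases hmain : 0 < tile ∧ 0 < w ∧ 0 < h
  · by_cases hord : (ord == "col") = true
    · exact eq_main_col words w h tile ord hmain.2.1 hmain.2.2 hmain.1 hord
    · exact eq_main_row words w h tile ord hmain.2.1 hmain.2.2 hmain.1 (Bool.not_eq_true _ ▸ (by simpa using hord))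
  · exact eq_degen words w h tile ord hpre hmain
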